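-- pv_equiv track=rewrite | github.com/michaelschleiss/mars2020-viewer | tools/msl_mardi_inventory.py | _collect_multiline_value
-- ===== SOURCE A (Python) =====
-- from typing import Dict, List, Optional, Tuple
--
-- def _strip_comments(line: str) -> str:
--     if "/*" in line:
--         return line.split("/*", 1)[0].rstrip()
--     return line.rstrip()
--
-- def _collect_multiline_value(first: str, lines: List[str], i: int) -> Tuple[str, int]:
--     """
--     Collect multi-line tuple or quoted string values.
--
--     Returns (value_text, next_index).
--     """
--     text = first.strip()
--     if text.count('"') % 2 == 1:
--         parts = [text]
--         i += 1
--         while i < len(lines):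
--             s = _strip_comments(lines[i]).strip()
--             parts.append(s)
--             if s.count('"') % 2 == 1:
--                 i += 1
--                 break
--             i += 1
--         return " ".join(parts).strip(), i
--
--     if "(" in text and text.count("(") > text.count(")"):
--         parts = [text]
--         i += 1
--         while i < len(lines):
--             s = _strip_comments(lines[i]).strip()
--             parts.append(s)
--             joined = " ".join(parts)
--             if joined.count(")") >= joined.count("("):
--                 i += 1
--                 break
--             if ")" in s:
--                 i += 1
--                 break
--             i += 1
--         return " ".join(parts).strip(), i
--
--     return text, i + 1
-- ===== SOURCE B (Python) =====
-- from typing import List, Tuple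
--
-- def _strip_comments(line: str) -> str:
--     if "/*" in line:
--         return line.split("/*", 1)[0].rstrip()
--     return line.rstrip()
--
-- def _clean(line: str) -> str:
--     return _strip_comments(line).strip()
--
-- def _quote_stop(lines: List[str], j: int, n: int) -> int:
--     """First stage: index just past the line closing the quoted string."""
--     while j < n:
--         if _clean(lines[j]).count('"') % 2 == 1:
--             return j + 1
--         j += 1
--     return j
--
-- def _paren_stop(lines: List[str], j: int, n: int, bal: int) -> int:
--     """First stage: index just past the line balancing the parentheses
--     (running open-minus-close balance)."""
--     while j < n:
--         s = _clean(lines[j])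
--         bal += s.count("(") - s.count(")")
--         if bal <= 0 or ")" in s:
--             return j + 1
--         j += 1
--     return j
--
-- def _collect_multiline_value(first: str, lines: List[str], i: int) -> Tuple[str, int]:
--     """Two-stage version: locate the terminating line first (running counters,
--     no accumulation), then materialise the value in one join over the index
--     range, instead of accumulating parts and re-joining/recounting per line."""
--     text = first.strip()
--     if text.count('"') % 2 == 1:
--         stop = _quote_stop(lines, i + 1, len(lines))
--     else:
--         opens, closes = text.count("("), text.count(")")
--         if "(" in text and opens > closes:
--             stop = _paren_stop(lines, i + 1, len(lines), opens - closes)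
--         else:
--             return text, i + 1
--     body = " ".join([text] + [_clean(lines[k]) for k in range(i + 1, stop)])
--     return body.strip(), stop
-- ===== Notes on version B (the rewrite author's own statement) =====
-- stated objective: alternative
-- what changed: B is two-staged: a first scan locates the terminating line using only running counters (no accumulation), and the value is then materialised by a single join over the index range, instead of A's single scan that accumulates parts and re-joins/re-counts the whole collected text on every iteration.
import Mathlib
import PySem

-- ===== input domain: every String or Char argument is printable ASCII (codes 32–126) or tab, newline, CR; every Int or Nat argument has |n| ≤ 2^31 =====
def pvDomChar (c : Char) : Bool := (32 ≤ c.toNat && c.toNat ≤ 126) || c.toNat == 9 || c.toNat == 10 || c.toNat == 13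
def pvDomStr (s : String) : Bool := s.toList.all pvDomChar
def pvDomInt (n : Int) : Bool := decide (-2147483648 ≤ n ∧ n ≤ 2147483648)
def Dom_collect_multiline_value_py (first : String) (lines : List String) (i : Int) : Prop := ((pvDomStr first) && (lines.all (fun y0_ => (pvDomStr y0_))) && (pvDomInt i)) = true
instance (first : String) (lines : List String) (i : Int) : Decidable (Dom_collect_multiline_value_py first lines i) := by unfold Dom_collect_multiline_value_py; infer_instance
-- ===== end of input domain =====

-- B is two-staged: it locates the terminating line first with running counters, then builds
-- the value in one join over the index range, instead of A's accumulate-and-rejoin-per-line scan.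

-- ===== PORT A =====
-- _strip_comments (same-module helper, used verbatim by both Pythons)
def pvStripComments (line : String) : String :=
  if PySem.Str.isIn "/*" line then
    PySem.Str.rstrip (((PySem.Str.splitMax? line "/*" 1).getD []).headD "")
  else PySem.Str.rstrip line

-- the quote-collecting while loop of A (fuel = number of remaining indices below len(lines))
def pvLoopAQ (lines : List String) : Nat → List String → Int → List String × Int
  | 0, parts, i => (parts, i)
  | fuel+1, parts, i =>
    if i < (lines.length : Int) then
      let s := PySem.Str.strip (pvStripComments (PySem.List.pyGetD lines i ""))
      let parts := parts ++ [s]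
      if PySem.Str.count s "\"" % 2 == 1 then (parts, i + 1)
      else pvLoopAQ lines fuel parts (i + 1)
    else (parts, i)

-- the parenthesis-collecting while loop of A: re-joins and re-counts every iteration
def pvLoopAP (lines : List String) : Nat → List String → Int → List String × Int
  | 0, parts, i => (parts, i)
  | fuel+1, parts, i =>
    if i < (lines.length : Int) then
      let s := PySem.Str.strip (pvStripComments (PySem.List.pyGetD lines i ""))
      let parts := parts ++ [s]
      let joined := PySem.Str.join " " parts
      if PySem.Str.count joined ")" ≥ PySem.Str.count joined "(" then (parts, i + 1)
      else if PySem.Str.isIn ")" s = true then (parts, i + 1)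
      else pvLoopAP lines fuel parts (i + 1)
    else (parts, i)

def collect_multiline_value_py (first : String) (lines : List String) (i : Int) : String × Int :=
  let text := PySem.Str.strip first
  if PySem.Str.count text "\"" % 2 == 1 then
    let r := pvLoopAQ lines ((lines.length : Int) - (i + 1)).toNat [text] (i + 1)
    (PySem.Str.strip (PySem.Str.join " " r.1), r.2)
  else if PySem.Str.isIn "(" text = true ∧ PySem.Str.count text ")" < PySem.Str.count text "(" then
    let r := pvLoopAP lines ((lines.length : Int) - (i + 1)).toNat [text] (i + 1)
    (PySem.Str.strip (PySem.Str.join " " r.1), r.2)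
  else (text, i + 1)

-- ===== PORT B =====
-- _clean
def pvClean (line : String) : String := PySem.Str.strip (pvStripComments line)

-- _quote_stop: stage 1, scan for the line with odd quote count; no accumulation
def pvQuoteStop (lines : List String) : Nat → Int → Int
  | 0, j => j
  | fuel+1, j =>
    if j < (lines.length : Int) then
      if PySem.Str.count (pvClean (PySem.List.pyGetD lines j "")) "\"" % 2 == 1 then j + 1
      else pvQuoteStop lines fuel (j + 1)
    else j

-- _paren_stop: stage 1, scan with a running open-minus-close balance
def pvParenStop (lines : List String) : Nat → Int → Int → Int
  | 0, j, _ => j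
  | fuel+1, j, bal =>
    if j < (lines.length : Int) then
      let s := pvClean (PySem.List.pyGetD lines j "")
      let bal := bal + (PySem.Str.count s "(" : Int) - (PySem.Str.count s ")" : Int)
      if bal ≤ 0 ∨ PySem.Str.isIn ")" s = true then j + 1
      else pvParenStop lines fuel (j + 1) bal
    else j

def collect_multiline_value_py_alt (first : String) (lines : List String) (i : Int) : String × Int :=
  let text := PySem.Str.strip first
  let n := (lines.length : Int)
  if PySem.Str.count text "\"" % 2 == 1 then
    let stop := pvQuoteStop lines (n - (i + 1)).toNat (i + 1)
    (PySem.Str.strip (PySem.Str.join " "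
        (text :: (PySem.List.pyRange (i + 1) stop 1).map (fun k => pvClean (PySem.List.pyGetD lines k "")))), stop)
  else
    let no := PySem.Str.count text "("
    let nc := PySem.Str.count text ")"
    if PySem.Str.isIn "(" text = true ∧ nc < no then
      let stop := pvParenStop lines (n - (i + 1)).toNat (i + 1) ((no : Int) - (nc : Int))
      (PySem.Str.strip (PySem.Str.join " "
          (text :: (PySem.List.pyRange (i + 1) stop 1).map (fun k => pvClean (PySem.List.pyGetD lines k "")))), stop)
    else (text, i + 1)

-- ===== PRECONDITION & SPEC =====
-- Pre_ excludes exactly the inputs on which the Python A RAISES (IndexError): when a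
-- multi-line branch is entered with i+1 < -len(lines), lines[i+1] is out of range.
def Pre_collect_multiline_value_py (first : String) (lines : List String) (i : Int) : Prop :=
  (PySem.Str.count (PySem.Str.strip first) "\"" % 2 = 1 ∨
    (PySem.Str.isIn "(" (PySem.Str.strip first) = true ∧
      PySem.Str.count (PySem.Str.strip first) ")" < PySem.Str.count (PySem.Str.strip first) "(")) →
  -(lines.length : Int) ≤ i + 1
instance (first : String) (lines : List String) (i : Int) : Decidable (Pre_collect_multiline_value_py first lines i) := by unfold Pre_collect_multiline_value_py; infer_instance

def pvWitness_collect_multiline_value_py : String × List String × Int :=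
  ("KEY = \"start", ["middle", "end\"", "rest"], 0)

def Spec_collect_multiline_value_py (first : String) (lines : List String) (i : Int) (out : String × Int) : Prop := out = collect_multiline_value_py_alt first lines i
instance (first : String) (lines : List String) (i : Int) (out : String × Int) : Decidable (Spec_collect_multiline_value_py first lines i out) := by unfold Spec_collect_multiline_value_py; infer_instance

-- ===== CLAIM (what is proved, stated in full; the proofs are below) =====
def Claim_equal_collect_multiline_value_py : Prop := ∀ (first : String) (lines : List String) (i : Int), Dom_collect_multiline_value_py first lines i → Pre_collect_multiline_value_py first lines i → Spec_collect_multiline_value_py first lines i (collect_multiline_value_py first lines i)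

-- ===== LEMMAS AND PROOFS =====

-- PySem.Chars.count with a single-character needle is List.count
theorem pvCountGo (c : Char) : ∀ (l : List Char) (fuel acc : Nat), l.length ≤ fuel →
    PySem.Chars.count.go [c] fuel l acc = acc + l.count c := by
  intro l
  induction l with
  | nil => intro fuel acc _; cases fuel <;> simp [PySem.Chars.count.go]
  | cons x t ih =>
    intro fuel acc h
    match fuel with
    | f + 1 =>
      have hf : t.length ≤ f := by simpa using h
      rw [PySem.Chars.count.go]
      by_cases hx : c = x
      · subst hx
        have hp : ([c].isPrefixOf (c :: t)) = true := by simp [List.isPrefixOf]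
        rw [if_pos hp, show List.drop ([c].length) (c :: t) = t from rfl, ih f (acc+1) hf]
        simp
        omega
      · have hp : ([c].isPrefixOf (x :: t)) = false := by
          simp [List.isPrefixOf]; exact hx
        rw [if_neg (by simp [hp]), ih f acc hf]
        simp [Ne.symm hx]

theorem pvCountSingleton (l : List Char) (c : Char) : PySem.Chars.count l [c] = l.count c := by
  simp [PySem.Chars.count, pvCountGo c l l.length 0 le_rfl]

-- appending one more part to a non-empty join
theorem pvJoinSnoc (sep s : List Char) : ∀ (a : List Char) (parts : List (List Char)),
    PySem.Chars.join sep ((a :: parts) ++ [s]) = PySem.Chars.join sep (a :: parts) ++ sep ++ s := by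
  intro a parts
  induction parts generalizing a with
  | nil => simp [PySem.Chars.join_cons_cons, PySem.Chars.join_singleton]
  | cons b rest ih =>
    rw [show (a :: (b :: rest)) ++ [s] = a :: ((b :: rest) ++ [s]) from rfl]
    rw [show a :: ((b :: rest) ++ [s]) = a :: (b :: (rest ++ [s])) from rfl]
    rw [PySem.Chars.join_cons_cons, show b :: (rest ++ [s]) = (b :: rest) ++ [s] from rfl, ih b,
      PySem.Chars.join_cons_cons]
    simp [List.append_assoc]

-- how the counted delimiters of the joined parts grow when one part is appended
theorem pvCountJoinSnoc (t s : String) (parts : List String) (c : Char) (hc : c ≠ ' ') :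
    PySem.Str.count (PySem.Str.join " " ((t :: parts) ++ [s])) (String.ofList [c])
      = PySem.Str.count (PySem.Str.join " " (t :: parts)) (String.ofList [c])
        + PySem.Str.count s (String.ofList [c]) := by
  simp only [PySem.Str.count_eq, PySem.Str.toList_join]
  rw [show (String.ofList [c]).toList = [c] by simp]
  rw [show List.map String.toList ((t :: parts) ++ [s])
        = (t.toList :: List.map String.toList parts) ++ [s.toList] by simp]
  rw [pvJoinSnoc]
  simp [pvCountSingleton, List.count_append, Ne.symm hc]

-- the stop index of either stage-1 scan never precedes its start
theorem pvQuoteStop_ge (lines : List String) : ∀ (fuel : Nat) (j : Int), j ≤ pvQuoteStop lines fuel j := by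
  intro fuel
  induction fuel with
  | zero => intro j; exact le_rfl
  | succ f ih =>
    intro j
    simp only [pvQuoteStop]
    split_ifs with h1 h2
    · omega
    · exact le_trans (by omega) (ih (j + 1))
    · exact le_rfl

theorem pvParenStop_ge (lines : List String) : ∀ (fuel : Nat) (j bal : Int), j ≤ pvParenStop lines fuel j bal := by
  intro fuel
  induction fuel with
  | zero => intro j bal; exact le_rfl
  | succ f ih =>
    intro j bal
    simp only [pvParenStop]
    split_ifs with h1 h2
    · omega
    · exact le_trans (by omega) (ih (j + 1) _)
    · exact le_rfl

-- A's quote loop = the parts over the index range up to B's stop index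
theorem pvLoopAQ_eq (lines : List String) : ∀ (fuel : Nat) (parts : List String) (j : Int),
    pvLoopAQ lines fuel parts j
      = (parts ++ (PySem.List.pyRange j (pvQuoteStop lines fuel j) 1).map
          (fun k => pvClean (PySem.List.pyGetD lines k "")), pvQuoteStop lines fuel j) := by
  intro fuel
  induction fuel with
  | zero =>
    intro parts j
    simp [pvLoopAQ, pvQuoteStop, PySem.List.pyRange_one_eq_nil le_rfl]
  | succ f ih =>
    intro parts j
    simp only [pvLoopAQ, pvQuoteStop]
    by_cases h : j < (lines.length : Int)
    · rw [if_pos h, if_pos h]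
      set s := PySem.Str.strip (pvStripComments (PySem.List.pyGetD lines j "")) with hs
      have hcs : pvClean (PySem.List.pyGetD lines j "") = s := rfl
      by_cases hq : (PySem.Str.count s "\"" % 2 == 1) = true
      · rw [if_pos hq, hcs, if_pos hq]
        rw [PySem.List.pyRange_one_singleton]
        simp only [List.map_cons, List.map_nil, hcs]
      · rw [if_neg (by simpa using hq), hcs, if_neg (by simpa using hq)]
        rw [ih (parts ++ [s]) (j + 1)]
        have hlt : j < pvQuoteStop lines f (j + 1) :=
          lt_of_lt_of_le (by omega) (pvQuoteStop_ge lines f (j + 1))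
        rw [PySem.List.pyRange_one_cons hlt]
        simp only [List.map_cons, hcs, List.append_assoc, List.singleton_append]

    · rw [if_neg h, if_neg h, PySem.List.pyRange_one_eq_nil le_rfl]
      simp

-- A's parenthesis loop = the parts over the index range up to B's stop index,
-- as long as bal equals the joined open-minus-close count
theorem pvLoopAP_eq (lines : List String) : ∀ (fuel : Nat) (t : String) (parts : List String) (j bal : Int),
    bal = (PySem.Str.count (PySem.Str.join " " (t :: parts)) "(" : Int)
            - (PySem.Str.count (PySem.Str.join " " (t :: parts)) ")" : Int) →
    pvLoopAP lines fuel (t :: parts) j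
      = ((t :: parts) ++ (PySem.List.pyRange j (pvParenStop lines fuel j bal) 1).map
          (fun k => pvClean (PySem.List.pyGetD lines k "")), pvParenStop lines fuel j bal) := by
  intro fuel
  induction fuel with
  | zero =>
    intro t parts j bal _
    simp [pvLoopAP, pvParenStop, PySem.List.pyRange_one_eq_nil le_rfl]
  | succ f ih =>
    intro t parts j bal hbal
    simp only [pvLoopAP, pvParenStop]
    by_cases h : j < (lines.length : Int)
    · rw [if_pos h, if_pos h]
      set s := PySem.Str.strip (pvStripComments (PySem.List.pyGetD lines j "")) with hs
      have hcs : pvClean (PySem.List.pyGetD lines j "") = s := rfl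
      have hop : PySem.Str.count (PySem.Str.join " " ((t :: parts) ++ [s])) "("
          = PySem.Str.count (PySem.Str.join " " (t :: parts)) "(" + PySem.Str.count s "(" := by
        simpa using pvCountJoinSnoc t s parts '(' (by decide)
      have hcl : PySem.Str.count (PySem.Str.join " " ((t :: parts) ++ [s])) ")"
          = PySem.Str.count (PySem.Str.join " " (t :: parts)) ")" + PySem.Str.count s ")" := by
        simpa using pvCountJoinSnoc t s parts ')' (by decide)
      have hbal' : bal + (PySem.Str.count s "(" : Int) - (PySem.Str.count s ")" : Int)
          = (PySem.Str.count (PySem.Str.join " " ((t :: parts) ++ [s])) "(" : Int)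
            - (PySem.Str.count (PySem.Str.join " " ((t :: parts) ++ [s])) ")" : Int) := by
        rw [hop, hcl]; omega
      by_cases h1 : PySem.Str.count (PySem.Str.join " " ((t :: parts) ++ [s])) ")"
          ≥ PySem.Str.count (PySem.Str.join " " ((t :: parts) ++ [s])) "("
      · rw [if_pos h1, hcs, if_pos (Or.inl (by omega))]
        rw [PySem.List.pyRange_one_singleton]
        simp only [List.map_cons, List.map_nil, hcs]
      · rw [if_neg h1]
        have hbgt : ¬ (bal + (PySem.Str.count s "(" : Int) - (PySem.Str.count s ")" : Int) ≤ 0) := by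
          rw [hbal']; omega
        by_cases h2 : PySem.Str.isIn ")" s = true
        · rw [if_pos h2, hcs, if_pos (Or.inr h2)]
          rw [PySem.List.pyRange_one_singleton]
          simp only [List.map_cons, List.map_nil, hcs]
        · rw [if_neg h2, hcs, if_neg (by rintro (hb | hb); exact hbgt hb; exact h2 hb)]
          rw [show (t :: parts) ++ [s] = t :: (parts ++ [s]) from rfl] at *
          rw [ih t (parts ++ [s]) (j + 1) _ hbal']
          have hlt : j < pvParenStop lines f (j + 1)
              (bal + (PySem.Str.count s "(" : Int) - (PySem.Str.count s ")" : Int)) :=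
            lt_of_lt_of_le (by omega) (pvParenStop_ge lines f (j + 1) _)
          rw [PySem.List.pyRange_one_cons hlt]
          simp only [List.map_cons, hcs, List.cons_append, List.append_assoc, List.nil_append]
    · rw [if_neg h, if_neg h, PySem.List.pyRange_one_eq_nil le_rfl]
      simp

-- ===== VERDICT (by name: the statement is the Claim_ definition above) =====
theorem collect_multiline_value_py_spec : Claim_equal_collect_multiline_value_py := by
  intro first lines i _dom _pre
  unfold Spec_collect_multiline_value_py collect_multiline_value_py collect_multiline_value_py_alt
  simp only []
  by_cases hq : (PySem.Str.count (PySem.Str.strip first) "\"" % 2 == 1) = true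
  · rw [if_pos hq, if_pos hq, pvLoopAQ_eq]
    rfl
  · rw [if_neg hq, if_neg hq]
    by_cases hp : PySem.Str.isIn "(" (PySem.Str.strip first) = true
        ∧ PySem.Str.count (PySem.Str.strip first) ")" < PySem.Str.count (PySem.Str.strip first) "("
    · rw [if_pos hp, if_pos hp]
      have hsingle : ∀ c : Char, c ≠ ' ' →
          PySem.Str.count (PySem.Str.join " " [PySem.Str.strip first]) (String.ofList [c])
            = PySem.Str.count (PySem.Str.strip first) (String.ofList [c]) := by
        intro c _
        simp only [PySem.Str.count_eq, PySem.Str.toList_join]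
        rw [show List.map String.toList [PySem.Str.strip first] = [(PySem.Str.strip first).toList] by simp]
        rw [PySem.Chars.join_singleton]
      rw [pvLoopAP_eq lines _ (PySem.Str.strip first) [] (i + 1)
        ((PySem.Str.count (PySem.Str.strip first) "(" : Int) - (PySem.Str.count (PySem.Str.strip first) ")" : Int))
        (by rw [show ("(" : String) = String.ofList ['('] by rfl, show (")" : String) = String.ofList [')'] by rfl,
                hsingle '(' (by decide), hsingle ')' (by decide)])]
      rfl
    · rw [if_neg hp, if_neg hp]
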